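-- pv_equiv track=rewrite | github.com/lbl59/what_actions | storage_dynamics.py | meets_conditions
-- ===== SOURCE A (Python) =====
-- def meets_conditions(window):
--   three_month = True
--   hits_negative = False
--   for i in range(len(window)):
--     if window[i] > 0:
--       three_month = False
--       break
--     else:
--       continue
--
--   for i in range(len(window)):
--     if window[i] <= -1:
--       hits_negative = True
--       break
--     else:
--       continue
--
--   if (three_month + hits_negative == 2):
--     return 1
--   else:
--     return 0
-- ===== SOURCE B (Python) =====
-- def meets_conditions(window):
--     w = sorted(window)
--     if not w:
--         return 0
--     return 1 if w[0] <= -1 and w[-1] <= 0 else 0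
-- ===== Notes on version B (the rewrite author's own statement) =====
-- stated objective: alternative
-- what changed: Replaced A's two early-break flag scans and flag-sum comparison by a sort-then-inspect-endpoints strategy: sort the window once and test the smallest (w[0] <= -1) and largest (w[-1] <= 0) elements.
import Mathlib
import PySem

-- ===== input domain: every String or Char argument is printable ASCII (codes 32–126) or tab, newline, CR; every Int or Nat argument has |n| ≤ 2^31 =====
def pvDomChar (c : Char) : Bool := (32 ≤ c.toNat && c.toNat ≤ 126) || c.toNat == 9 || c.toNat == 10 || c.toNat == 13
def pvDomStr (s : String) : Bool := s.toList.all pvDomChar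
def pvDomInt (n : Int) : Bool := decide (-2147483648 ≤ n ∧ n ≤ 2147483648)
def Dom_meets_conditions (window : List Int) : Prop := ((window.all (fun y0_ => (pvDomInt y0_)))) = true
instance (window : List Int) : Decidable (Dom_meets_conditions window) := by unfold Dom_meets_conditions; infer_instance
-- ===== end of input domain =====

-- B replaces A's two early-break flag scans by sort-then-inspect-endpoints (objective: alternative; not faster).

-- ===== PORT A =====
-- first loop: three_month stays true unless some element > 0 (break on first such)
def mcLoop1 : List Int → Bool
  | [] => true
  | x :: xs => if x > 0 then false else mcLoop1 xs

-- second loop: hits_negative becomes true on first element ≤ -1 (break)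
def mcLoop2 : List Int → Bool
  | [] => false
  | x :: xs => if x ≤ -1 then true else mcLoop2 xs

def meets_conditions (window : List Int) : Int :=
  let three_month := mcLoop1 window
  let hits_negative := mcLoop2 window
  if (if three_month then (1:Int) else 0) + (if hits_negative then 1 else 0) = 2 then 1 else 0

-- ===== PORT B =====
-- w = sorted(window); empty → 0; else test w[0] <= -1 and w[-1] <= 0
def meets_conditions_alt (window : List Int) : Int :=
  match PySem.List.sorted window (fun y => y) false with
  | [] => 0
  | x :: xs => if x ≤ -1 ∧ (x :: xs).getLast (List.cons_ne_nil x xs) ≤ 0 then 1 else 0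

-- ===== PRECONDITION & SPEC =====
def Spec_meets_conditions (window : List Int) (out : Int) : Prop := out = meets_conditions_alt window
instance (window : List Int) (out : Int) : Decidable (Spec_meets_conditions window out) := by unfold Spec_meets_conditions; infer_instance

-- ===== CLAIM (what is proved, stated in full; the proofs are below) =====
def Claim_equal_meets_conditions : Prop := ∀ (window : List Int), Dom_meets_conditions window → Spec_meets_conditions window (meets_conditions window)

-- ===== LEMMAS AND PROOFS =====
theorem mcLoop1_iff (w : List Int) : mcLoop1 w = true ↔ ∀ y ∈ w, y ≤ 0 := by
  induction w with
  | nil => simp [mcLoop1]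
  | cons x xs ih =>
    simp only [mcLoop1]
    by_cases h : x > 0 <;> simp [h, ih] <;> omega

theorem mcLoop2_iff (w : List Int) : mcLoop2 w = true ↔ ∃ y ∈ w, y ≤ -1 := by
  induction w with
  | nil => simp [mcLoop2]
  | cons x xs ih =>
    simp only [mcLoop2]
    by_cases h : x ≤ -1 <;> simp [h, ih]

-- in a ≤-pairwise list every element is ≤ the last
theorem le_getLast_of_pairwise (l : List Int) :
    ∀ (hne : l ≠ []), l.Pairwise (· ≤ ·) → ∀ y ∈ l, y ≤ l.getLast hne := by
  induction l with
  | nil => intro hne; exact absurd rfl hne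
  | cons x xs ih =>
    intro hne hp y hy
    rw [List.pairwise_cons] at hp
    cases xs with
    | nil => simp_all
    | cons z zs =>
      rw [List.getLast_cons (List.cons_ne_nil z zs)]
      rcases List.mem_cons.mp hy with rfl | hy'
      · exact hp.1 _ (List.getLast_mem _)
      · exact ih (List.cons_ne_nil z zs) hp.2 y hy' 

-- ===== VERDICT (by name: the statement is the Claim_ definition above) =====
theorem meets_conditions_spec : Claim_equal_meets_conditions := by
  intro window _hdom
  unfold Spec_meets_conditions meets_conditions meets_conditions_alt
  cases hs : PySem.List.sorted window (fun y => y) false with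
  | nil =>
    have hw : window = [] := (PySem.List.sorted_eq_nil_iff window (fun y => y) false).mp hs
    subst hw; simp [mcLoop1, mcLoop2]
  | cons x xs =>
    have hperm : (x :: xs).Perm window := by rw [← hs]; exact PySem.List.sorted_perm ..
    have hpw : (x :: xs).Pairwise (· ≤ ·) := by
      have := PySem.List.sorted_pairwise window (fun y => y)
      rw [hs] at this; simpa using this
    have hne : window ≠ [] := by
      intro h; subst h; exact absurd (hperm.length_eq) (by simp)
    have hmem : ∀ y, y ∈ window ↔ y ∈ x :: xs := fun y => (hperm.mem_iff).symm
    have hxmin : ∀ y ∈ window, x ≤ y := by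
      intro y hy
      have hpw' := List.pairwise_cons.mp hpw
      rcases List.mem_cons.mp ((hmem y).mp hy) with h | h
      · exact h ▸ le_rfl
      · exact hpw'.1 y h
    have hlast : ∀ y ∈ window, y ≤ (x :: xs).getLast (List.cons_ne_nil x xs) := by
      intro y hy
      exact le_getLast_of_pairwise _ _ hpw y ((hmem y).mp hy)
    have hlastmem : (x :: xs).getLast (List.cons_ne_nil x xs) ∈ window :=
      (hmem _).mpr (List.getLast_mem _)
    have hxmem : x ∈ window := (hmem x).mpr (List.mem_cons_self)
    -- now relate the two boolean flags to the endpoint tests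
    by_cases hc : x ≤ -1 ∧ (x :: xs).getLast (List.cons_ne_nil x xs) ≤ 0
    · have h1 : mcLoop1 window = true :=
        (mcLoop1_iff window).mpr (fun y hy => le_trans (hlast y hy) hc.2)
      have h2 : mcLoop2 window = true :=
        (mcLoop2_iff window).mpr ⟨x, hxmem, hc.1⟩
      simp [h1, h2, hc]
    · rcases not_and_or.mp hc with h | h
      · have h2 : mcLoop2 window = false := by
          rw [← Bool.not_eq_true, mcLoop2_iff]
          push Not
          intro y hy
          have := hxmin y hy
          omega
        simp [h2, hc]
        split <;> simp_all
      · have h1 : mcLoop1 window = false := by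
          rw [← Bool.not_eq_true, mcLoop1_iff]
          push Not
          exact ⟨_, hlastmem, by omega⟩
        simp [h1, hc]
        split <;> simp_all
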